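/- GENERATED by mk_final_copies.py from the proof of the farm's unit `compute_twiddle_factors` (farm:compute_twiddle_factors.1: Proof.lean) as the
   re-elaboration sweep compiled it — do not edit. -/
import Asan.CheckWalk
import Vorbis.Spec.Units.compute_twiddle_factors
import Vorbis.Spec.Worked.compute_twiddle_factors_Lemmas

open X86 X86.User Asan Vorbis Vorbis.Spec

set_option maxRecDepth 4000
set_option maxHeartbeats 16000000

namespace Vorbis.Spec.compute_twiddle_factors

/-- **Loop 2** (10be43H, stb_vorbis_fixed.c:1292 `for (k=k2=0; k < n8; ++k,k2+=2)`) **and the epilogue**: from the loop head with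
`r12d = k ≤ n8`, `ebx = 2k` and the frame `TwFrame`, the function returns. Measure `n8 − k`. Each round: a call of `cos`, the checked
store of `C[k2]`, a call of `sin`, the checked store of `C[k2+1]`; after every call the frame is re-established (`TwFrame.transfer`). -/
theorem loop2_ok {Lay : Layout} (hLay : Lay.hi = 0x1000000) {μ : Microarch} (hμ : UserX.MicroOK μ) {u₀ : State}
    (hcode : HasCodeNat Lay u₀ Vorbis.L.compute_twiddle_factors.entry Vorbis.Code.code_compute_twiddle_factors.nat
      Vorbis.L.compute_twiddle_factors.size)
    {others : List Obj} {frames : List (Nat × FrameLayout)}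
    (hcos : Calls Lay μ Vorbis.WayInv (Vorbis.conv u₀) Vorbis.L.cos.entry (Vorbis.Spec.cos.spec others frames))
    (hstore4 : Asan.SmallCheck Lay μ Vorbis.WayInv (Vorbis.CodeOK u₀) [.rax, .rcx, .rdx] 4 Vorbis.L.__asan_store4_noabort.entry)
    (hsin : Calls Lay μ Vorbis.WayInv (Vorbis.conv u₀) Vorbis.L.sin.entry (Vorbis.Spec.sin.spec others frames))
    {u : State} {ret : Word}
    (he : AtEntry (conv u₀) Vorbis.L.compute_twiddle_factors.entry (compute_twiddle_factors.spec others frames).frame ret u)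
    (hpre : (compute_twiddle_factors.spec others frames).pre u)
    {N : Nat} (hN : arg32 u .rdi = N)
    (s : State) (k : Nat) (w_rip : s.rip = Vorbis.L.compute_twiddle_factors.loop2) (hb : TwFrame u₀ u ret N s)
    (hk1 : s.reg .r12 = UInt64.ofNat k) (hk2 : s.reg .rbx = UInt64.ofNat (2 * k)) (hkle : k ≤ N / 8)
    (w_kept : RegsKept [.rbx, .r12, .rbp, .r15, .r13, .r14, .rdi, .rax, .rsp, .rcx, .rdx, .rsi, .r8, .r9, .r10, .r11, .r16, .r17, .r18,
      .r19, .r20, .r21, .r22, .r23, .r24, .r25, .r26, .r27, .r28, .r29, .r30, .r31] u s) :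
    ReachVia Lay μ WayInv s (Returned (conv u₀) (compute_twiddle_factors.spec others frames) u ret) := by
  v_entry he
  have hpre0 := hpre
  obtain ⟨hsh, hblk, hA, hB, hC⟩ := hpre0
  have hsp := hsh.rsp
  rw [hN] at hblk hA hB hC
  obtain ⟨hN64, hNlo, hNhi⟩ := hblk.facts
  -- where `A`, `B`, `C` are: in the data space, off the text, off this function's stack
  obtain ⟨hA1, hA2, hA3⟩ := hA.where_ hsh.inv hsh.offText (by omega) (by omega)
  obtain ⟨hB1, hB2, hB3⟩ := hB.where_ hsh.inv hsh.offText (by omega) (by omega)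
  obtain ⟨hC1, hC2, hC3⟩ := hC.where_ hsh.inv hsh.offText (by omega) (by omega)
  have hA4 : (u.reg .rsp).toNat + 8 ≤ (u.reg .rsi).toNat ∨ (u.reg .rsi).toNat + 2 * N ≤ (u.reg .rsp).toNat - 160 := by
    omega
  have hB4 : (u.reg .rsp).toNat + 8 ≤ (u.reg .rdx).toNat ∨ (u.reg .rdx).toNat + 2 * N ≤ (u.reg .rsp).toNat - 160 := by
    omega
  have hC4 : (u.reg .rsp).toNat + 8 ≤ (u.reg .rcx).toNat ∨ (u.reg .rcx).toNat + N ≤ (u.reg .rsp).toNat - 160 := by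
    omega
  clear hA3 hB3 hC3
  u_loop [k] (fun v => N / 8 - (v.reg .r12).toNat)
  have hb0 := hb
  obtain ⟨w_rsp, w_eq, hsame, hun, hs0, hs1, hs2, hs3, hs4, hs5, hs6, hsA, hsB, hsC, hsn, hsn4, hsn8, hdf, hmx⟩ := hb0
  -- `movsxd` of `k2` is `k2` (a rewrite rule of every step)
  have hsx : Word.ofBV (BitVec.signExtend 64 (Word.part .w32 (UInt64.ofNat (2 * k)))) = UInt64.ofNat (2 * k) :=
    sext_ofNat (2 * k) (by omega)
  -- 10be43H: the loop test `k < n8`; the body to the call of `cos` (stb_vorbis_fixed.c:1292, 1293), or the epilogue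
  u_walk hcode [hμ.vendor, hsx] until [Vorbis.L.compute_twiddle_factors.loop1, Vorbis.L.compute_twiddle_factors.loop2]
    span [Vorbis.L.textLo, Vorbis.L.textHi] side (v_side)
  case call_inv => v_inv
  case pre_10bde5 =>
    show ShadowPre others frames s_10bde5
    refine hsh.callee ?_ ?_ ?_ ?_
    · v_untouched
    · rw [w_rsp]
      u_omega
    · rw [w_rsp]
      u_omega
    · rw [w_rsp]
      u_omega
  case cont =>
    -- 10bdeaH: after `cos`; the checked store of `C[k2]`, the call of `sin` (stb_vorbis_fixed.c:1293, 1294)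
    have hklt : k < N / 8 := (lt_of_cmp k (N / 8) (by omega) (by omega)).mp hbr_10be4a
    v_after_call w_rsp_10bde5 w_mem_10bde5
    have hb1 : TwFrame u₀ u ret N s_10bde5r :=
      TwFrame.transfer hb he_room he_top hA4 hB4 hC4 hA2 hB2 hC2 w_rsp w_eq
        (step_call he_room he_top w_same) w_df w_mx
    clear hsame hun hs0 hs1 hs2 hs3 hs4 hs5 hs6 hsA hsB hsC hsn hsn4 hsn8 hdf hmx
    have hb1' := hb1
    obtain ⟨_, _, hsame, hun, hs0, hs1, hs2, hs3, hs4, hs5, hs6, hsA, hsB, hsC, hsn, hsn4, hsn8, _, _⟩ := hb1'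
    u_walk hcode [hμ.vendor, hsx] until [Vorbis.L.compute_twiddle_factors.loop1, Vorbis.L.compute_twiddle_factors.loop2]
      span [Vorbis.L.textLo, Vorbis.L.textHi] side (v_side)
    case check_10be05 =>
      -- the float is inside the live block; no store so far went to the shadow
      have hun' : ShadowUntouched u.mem s_10be05.mem := by v_untouched
      exact hC.accSmall hsh.inv hun' _ 4 (by decide) (by u_omega) (by u_omega)
    case call_inv => v_inv
    case pre_10be12 =>
      show ShadowPre others frames s_10be12
      refine hsh.callee ?_ ?_ ?_ ?_
      · v_untouched
      · rw [w_rsp]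
        u_omega
      · rw [w_rsp]
        u_omega
      · rw [w_rsp]
        u_omega
    case cont =>
      -- 10be17H: after `sin`; the checked store of `C[k2+1]`, `++k, k2 += 2` (stb_vorbis_fixed.c:1294, 1292)
      v_after_call w_rsp_10be12 w_mem_10be12
      have hb2 : TwFrame u₀ u ret N s_10be12r :=
        TwFrame.transfer hb1 he_room he_top hA4 hB4 hC4 hA2 hB2 hC2 w_rsp w_eq
          (step_store_call he_room he_top (by u_omega) (Or.inr (Or.inr ⟨by u_omega, by u_omega⟩)) w_same) w_df w_mx
      clear hsame hun hs0 hs1 hs2 hs3 hs4 hs5 hs6 hsA hsB hsC hsn hsn4 hsn8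
      have hb2' := hb2
      obtain ⟨_, _, hsame, hun, hs0, hs1, hs2, hs3, hs4, hs5, hs6, hsA, hsB, hsC, hsn, hsn4, hsn8, _, _⟩ := hb2'
      u_walk hcode [hμ.vendor, hsx] until [Vorbis.L.compute_twiddle_factors.loop1, Vorbis.L.compute_twiddle_factors.loop2]
        span [Vorbis.L.textLo, Vorbis.L.textHi] side (v_side)
      case check_10be33 =>
        -- the float is inside the live block; no store so far went to the shadow
        have hun' : ShadowUntouched u.mem s_10be33.mem := by v_untouched
        exact hC.accSmall hsh.inv hun' _ 4 (by decide) (by u_omega) (by u_omega)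
      case cont =>
        -- the back edge
        u_loop_back [k + 1]
        · -- the frame: the last store went into the table
          refine TwFrame.transfer hb2 he_room he_top hA4 hB4 hC4 hA2 hB2 hC2 w_rsp w_eq ?_ ?_ ?_
          · rw [w_mem]
            exact step_store he_room he_top (by u_omega) (Or.inr (Or.inr ⟨by u_omega, by u_omega⟩))
          · rw [w_flags]
            simp only [X86.User.df_setStatus]
            exact w_df_10be33
          · rw [w_mxcsr]
            with_reducible assumption
        · rw [w_r12]
          exact add32_ofNat k 1 (by omega)
        · rw [w_rbx]
          exact add32_ofNat (2 * k) 2 (by omega)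
        · omega
        · rw [w_r12, add32_ofNat k 1 (by omega), UInt64.toNat_ofNat', UInt64.toNat_ofNat']
          omega
  case cont =>
    -- 10be50H: the exit `k ≥ n8`, the epilogue and the `ret` (stb_vorbis_fixed.c:1296)
    refine ReachVia.done (Or.inl ?_)
    v_returned
    · -- the post: no shadow byte was written
      show ShadowUntouched u.mem s_10be5e.mem
      rw [w_mem]
      exact hun
    · -- the footprint
      simp only [X86.User.Spec.footprint, vspec, hN]
      rw [w_mem]
      exact hsame

/-- **Loop 1** (10bda1H, stb_vorbis_fixed.c:1286 `for (k=k2=0; k < n4; ++k,k2+=2)`) **and all that follows**: from the loop head with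
`r13d = k ≤ n4`, `r14d = 2k` and the frame `TwFrame`, the function returns. Measure `n4 − k`. Each round: `cos`, the checked store of
`A[k2]`, `sin`, `A[k2+1]`, `cos`, `B[k2]`, `sin`, `B[k2+1]`; at the exit the head of loop 2 is reached with `k = 0` (`loop2_ok`). -/
theorem loop1_ok {Lay : Layout} (hLay : Lay.hi = 0x1000000) {μ : Microarch} (hμ : UserX.MicroOK μ) {u₀ : State}
    (hcode : HasCodeNat Lay u₀ Vorbis.L.compute_twiddle_factors.entry Vorbis.Code.code_compute_twiddle_factors.nat
      Vorbis.L.compute_twiddle_factors.size)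
    {others : List Obj} {frames : List (Nat × FrameLayout)}
    (hcos : Calls Lay μ Vorbis.WayInv (Vorbis.conv u₀) Vorbis.L.cos.entry (Vorbis.Spec.cos.spec others frames))
    (hstore4 : Asan.SmallCheck Lay μ Vorbis.WayInv (Vorbis.CodeOK u₀) [.rax, .rcx, .rdx] 4 Vorbis.L.__asan_store4_noabort.entry)
    (hsin : Calls Lay μ Vorbis.WayInv (Vorbis.conv u₀) Vorbis.L.sin.entry (Vorbis.Spec.sin.spec others frames))
    {u : State} {ret : Word}
    (he : AtEntry (conv u₀) Vorbis.L.compute_twiddle_factors.entry (compute_twiddle_factors.spec others frames).frame ret u)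
    (hpre : (compute_twiddle_factors.spec others frames).pre u)
    {N : Nat} (hN : arg32 u .rdi = N)
    (s : State) (k : Nat) (w_rip : s.rip = Vorbis.L.compute_twiddle_factors.loop1) (hb : TwFrame u₀ u ret N s)
    (hk1 : s.reg .r13 = UInt64.ofNat k) (hk2 : s.reg .r14 = UInt64.ofNat (2 * k)) (hkle : k ≤ N / 4)
    (w_kept : RegsKept [.rbx, .r12, .rbp, .r15, .r13, .r14, .rdi, .rax, .rsp, .rcx, .rdx, .rsi, .r8, .r9, .r10, .r11, .r16, .r17, .r18,
      .r19, .r20, .r21, .r22, .r23, .r24, .r25, .r26, .r27, .r28, .r29, .r30, .r31] u s) :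
    ReachVia Lay μ WayInv s (Returned (conv u₀) (compute_twiddle_factors.spec others frames) u ret) := by
  v_entry he
  have hpre0 := hpre
  obtain ⟨hsh, hblk, hA, hB, hC⟩ := hpre0
  have hsp := hsh.rsp
  rw [hN] at hblk hA hB hC
  obtain ⟨hN64, hNlo, hNhi⟩ := hblk.facts
  -- where `A`, `B`, `C` are: in the data space, off the text, off this function's stack
  obtain ⟨hA1, hA2, hA3⟩ := hA.where_ hsh.inv hsh.offText (by omega) (by omega)
  obtain ⟨hB1, hB2, hB3⟩ := hB.where_ hsh.inv hsh.offText (by omega) (by omega)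
  obtain ⟨hC1, hC2, hC3⟩ := hC.where_ hsh.inv hsh.offText (by omega) (by omega)
  have hA4 : (u.reg .rsp).toNat + 8 ≤ (u.reg .rsi).toNat ∨ (u.reg .rsi).toNat + 2 * N ≤ (u.reg .rsp).toNat - 160 := by
    omega
  have hB4 : (u.reg .rsp).toNat + 8 ≤ (u.reg .rdx).toNat ∨ (u.reg .rdx).toNat + 2 * N ≤ (u.reg .rsp).toNat - 160 := by
    omega
  have hC4 : (u.reg .rsp).toNat + 8 ≤ (u.reg .rcx).toNat ∨ (u.reg .rcx).toNat + N ≤ (u.reg .rsp).toNat - 160 := by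
    omega
  clear hA3 hB3 hC3
  u_loop [k] (fun v => N / 4 - (v.reg .r13).toNat)
  have hb0 := hb
  obtain ⟨w_rsp, w_eq, hsame, hun, hs0, hs1, hs2, hs3, hs4, hs5, hs6, hsA, hsB, hsC, hsn, hsn4, hsn8, hdf, hmx⟩ := hb0
  -- `movsxd` of `k2` is `k2` (a rewrite rule of every step)
  have hsx : Word.ofBV (BitVec.signExtend 64 (Word.part .w32 (UInt64.ofNat (2 * k)))) = UInt64.ofNat (2 * k) :=
    sext_ofNat (2 * k) (by omega)
  -- 10bda1H: the loop test `k < n4`; the body to the first call of `cos` (stb_vorbis_fixed.c:1286, 1287), or on to loop 2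
  u_walk hcode [hμ.vendor, hsx] until [Vorbis.L.compute_twiddle_factors.loop1, Vorbis.L.compute_twiddle_factors.loop2]
    span [Vorbis.L.textLo, Vorbis.L.textHi] side (v_side)
  case call_inv => v_inv
  case pre_10bcb4 =>
    show ShadowPre others frames s_10bcb4
    refine hsh.callee ?_ ?_ ?_ ?_
    · v_untouched
    · rw [w_rsp]
      u_omega
    · rw [w_rsp]
      u_omega
    · rw [w_rsp]
      u_omega
  case cont =>
    -- 10bcb9H: after `cos`; the checked store of `A[k2]`, the call of `sin` (stb_vorbis_fixed.c:1287, 1288)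
    have hklt : k < N / 4 := (lt_of_cmp k (N / 4) (by omega) (by omega)).mp hbr_10bda8
    v_after_call w_rsp_10bcb4 w_mem_10bcb4
    have hb1 : TwFrame u₀ u ret N s_10bcb4r :=
      TwFrame.transfer hb he_room he_top hA4 hB4 hC4 hA2 hB2 hC2 w_rsp w_eq
        (step_spill_call he_room he_top w_same) w_df w_mx
    clear hsame hun hs0 hs1 hs2 hs3 hs4 hs5 hs6 hsA hsB hsC hsn hsn4 hsn8 hdf hmx
    have hb1' := hb1
    obtain ⟨_, _, hsame, hun, hs0, hs1, hs2, hs3, hs4, hs5, hs6, hsA, hsB, hsC, hsn, hsn4, hsn8, _, _⟩ := hb1'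
    u_walk hcode [hμ.vendor, hsx] until [Vorbis.L.compute_twiddle_factors.loop1, Vorbis.L.compute_twiddle_factors.loop2]
      span [Vorbis.L.textLo, Vorbis.L.textHi] side (v_side)
    case check_10bcdc =>
      -- the float is inside the live block; no store so far went to the shadow
      have hun' : ShadowUntouched u.mem s_10bcdc.mem := by v_untouched
      exact hA.accSmall hsh.inv hun' _ 4 (by decide) (by u_omega) (by u_omega)
    case call_inv => v_inv
    case pre_10bceb =>
      show ShadowPre others frames s_10bceb
      refine hsh.callee ?_ ?_ ?_ ?_
      · v_untouched
      · rw [w_rsp]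
        u_omega
      · rw [w_rsp]
        u_omega
      · rw [w_rsp]
        u_omega
    case cont =>
      -- 10bcf0H: after `sin`; the checked store of `A[k2+1]`, the call of `cos` (stb_vorbis_fixed.c:1288, 1289)
      v_after_call w_rsp_10bceb w_mem_10bceb
      have hb2 : TwFrame u₀ u ret N s_10bcebr :=
        TwFrame.transfer hb1 he_room he_top hA4 hB4 hC4 hA2 hB2 hC2 w_rsp w_eq
          (step_store_call he_room he_top (by u_omega) (Or.inl ⟨by u_omega, by u_omega⟩) w_same) w_df w_mx
      clear hsame hun hs0 hs1 hs2 hs3 hs4 hs5 hs6 hsA hsB hsC hsn hsn4 hsn8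
      have hb2' := hb2
      obtain ⟨_, _, hsame, hun, hs0, hs1, hs2, hs3, hs4, hs5, hs6, hsA, hsB, hsC, hsn, hsn4, hsn8, _, _⟩ := hb2'
      u_walk hcode [hμ.vendor, hsx] until [Vorbis.L.compute_twiddle_factors.loop1, Vorbis.L.compute_twiddle_factors.loop2]
        span [Vorbis.L.textLo, Vorbis.L.textHi] side (v_side)
      case check_10bd14 =>
        -- the float is inside the live block; no store so far went to the shadow
        have hun' : ShadowUntouched u.mem s_10bd14.mem := by v_untouched
        exact hA.accSmall hsh.inv hun' _ 4 (by decide) (by u_omega) (by u_omega)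
      case call_inv => v_inv
      case pre_10bd43 =>
        show ShadowPre others frames s_10bd43
        refine hsh.callee ?_ ?_ ?_ ?_
        · v_untouched
        · rw [w_rsp]
          u_omega
        · rw [w_rsp]
          u_omega
        · rw [w_rsp]
          u_omega
      case cont =>
        -- 10bd48H: after `cos`; the checked store of `B[k2]`, the call of `sin` (stb_vorbis_fixed.c:1289, 1290)
        v_after_call w_rsp_10bd43 w_mem_10bd43
        have hb3 : TwFrame u₀ u ret N s_10bd43r :=
          TwFrame.transfer hb2 he_room he_top hA4 hB4 hC4 hA2 hB2 hC2 w_rsp w_eq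
            (step_store_call he_room he_top (by u_omega) (Or.inl ⟨by u_omega, by u_omega⟩) w_same) w_df w_mx
        clear hsame hun hs0 hs1 hs2 hs3 hs4 hs5 hs6 hsA hsB hsC hsn hsn4 hsn8
        have hb3' := hb3
        obtain ⟨_, _, hsame, hun, hs0, hs1, hs2, hs3, hs4, hs5, hs6, hsA, hsB, hsC, hsn, hsn4, hsn8, _, _⟩ := hb3'
        u_walk hcode [hμ.vendor, hsx] until [Vorbis.L.compute_twiddle_factors.loop1, Vorbis.L.compute_twiddle_factors.loop2]
          span [Vorbis.L.textLo, Vorbis.L.textHi] side (v_side)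
        case check_10bd64 =>
          -- the float is inside the live block; no store so far went to the shadow
          have hun' : ShadowUntouched u.mem s_10bd64.mem := by v_untouched
          exact hB.accSmall hsh.inv hun' _ 4 (by decide) (by u_omega) (by u_omega)
        case call_inv => v_inv
        case pre_10bd72 =>
          show ShadowPre others frames s_10bd72
          refine hsh.callee ?_ ?_ ?_ ?_
          · v_untouched
          · rw [w_rsp]
            u_omega
          · rw [w_rsp]
            u_omega
          · rw [w_rsp]
            u_omega
        case cont =>
          -- 10bd77H: after `sin`; the checked store of `B[k2+1]`, `++k, k2 += 2` (stb_vorbis_fixed.c:1290, 1286)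
          v_after_call w_rsp_10bd72 w_mem_10bd72
          have hb4 : TwFrame u₀ u ret N s_10bd72r :=
            TwFrame.transfer hb3 he_room he_top hA4 hB4 hC4 hA2 hB2 hC2 w_rsp w_eq
              (step_store_call he_room he_top (by u_omega) (Or.inr (Or.inl ⟨by u_omega, by u_omega⟩)) w_same) w_df w_mx
          clear hsame hun hs0 hs1 hs2 hs3 hs4 hs5 hs6 hsA hsB hsC hsn hsn4 hsn8
          have hb4' := hb4
          obtain ⟨_, _, hsame, hun, hs0, hs1, hs2, hs3, hs4, hs5, hs6, hsA, hsB, hsC, hsn, hsn4, hsn8, _, _⟩ := hb4'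
          u_walk hcode [hμ.vendor, hsx] until [Vorbis.L.compute_twiddle_factors.loop1, Vorbis.L.compute_twiddle_factors.loop2]
            span [Vorbis.L.textLo, Vorbis.L.textHi] side (v_side)
          case check_10bd92 =>
            -- the float is inside the live block; no store so far went to the shadow
            have hun' : ShadowUntouched u.mem s_10bd92.mem := by v_untouched
            exact hB.accSmall hsh.inv hun' _ 4 (by decide) (by u_omega) (by u_omega)
          case cont =>
            -- the back edge
            u_loop_back [k + 1]
            · -- the frame: the last store went into the table
              refine TwFrame.transfer hb4 he_room he_top hA4 hB4 hC4 hA2 hB2 hC2 w_rsp w_eq ?_ ?_ ?_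
              · rw [w_mem]
                exact step_store he_room he_top (by u_omega) (Or.inr (Or.inl ⟨by u_omega, by u_omega⟩))
              · rw [w_flags]
                simp only [X86.User.df_setStatus]
                exact w_df_10bd92
              · rw [w_mxcsr]
                exact hmx_10bd83
            · rw [w_r13]
              exact add32_ofNat k 1 (by omega)
            · rw [w_r14]
              exact add32_ofNat (2 * k) 2 (by omega)
            · omega
            · rw [w_r13, add32_ofNat k 1 (by omega), UInt64.toNat_ofNat', UInt64.toNat_ofNat']
              omega
  case cont =>
    -- 10bdaeH: the exit `k ≥ n4`: `k = k2 = 0`, the head of loop 2 (stb_vorbis_fixed.c:1292)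
    refine ReachVia.mono ?_ (fun v hv => Or.inl hv)
    have hb' : TwFrame u₀ u ret N s_10bdb9 := by
      refine hb.of_mem_eq w_mem w_rsp ?_ ?_
      · rw [w_flags]
        simp only [X86.User.df_setStatus]
        exact hdf
      · rw [w_mxcsr]
        exact hmx
    exact loop2_ok hLay hμ hcode hcos hstore4 hsin he hpre hN s_10bdb9 0 w_rip hb' w_r12 w_rbx (Nat.zero_le _) w_kept

end Vorbis.Spec.compute_twiddle_factors

/-- `compute_twiddle_factors` satisfies its contract: the prologue (six pushes, `sub rsp, 48H`, the spills of `n`, `A`, `B`, `C`, `n4`,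
`n8`) establishes the frame `TwFrame` at the head of loop 1 with `k = 0`; the two loops and the epilogue are `loop1_ok` / `loop2_ok`. -/
theorem Vorbis.Spec.Worked.compute_twiddle_factors_ok : Vorbis.Spec.compute_twiddle_factors.Statement := by
  intro Lay hLay μ hμ u₀ hcode h_cos hstore4 h_sin others frames u ret he hpre
  have he0 := he
  v_entry he
  have hcos := h_cos others frames
  have hsin := h_sin others frames
  obtain ⟨N, hN⟩ : ∃ N : Nat, arg32 u .rdi = N := ⟨_, rfl⟩
  have hblk : Mdct.IsBlocksize N := by
    rw [← hN]
    exact hpre.2.1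
  have hNr : (Word.part Width.w32 (u.reg Reg.rdi)).toNat = N := by
    rw [part32_toNat, ← arg32_def]
    exact hN
  obtain ⟨hN64, hNlo, hNhi⟩ := hblk.facts
  -- 10bc40H: the prologue, to the head of loop 1 (stb_vorbis_fixed.c:1282 – 1286)
  u_walk hcode [hμ.vendor] until [Vorbis.L.compute_twiddle_factors.loop1] span [Vorbis.L.textLo, Vorbis.L.textHi] side (v_side)
  -- 10bda1H: the frame of the body, `k = k2 = 0`
  have hb : Vorbis.Spec.compute_twiddle_factors.TwFrame u₀ u ret N s_10bc7d := by
    refine ⟨w_rsp, w_eq, ?_, ?_, ?_, ?_, ?_, ?_, ?_, ?_, ?_, ?_, ?_, ?_, ?_, ?_, ?_, ?_, ?_⟩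
    · u_same
    · v_untouched
    · u_resolve
    · u_resolve
    · u_resolve
    · u_resolve
    · u_resolve
    · u_resolve
    · u_resolve
    · u_resolve
    · u_resolve
    · u_resolve
    · rw [w_mem]
      u_read
    · rw [w_mem, ← hNr, ← Vorbis.Spec.compute_twiddle_factors.sar32_toNat _ 2 (by omega)]
      u_read
    · rw [w_mem, ← hNr, ← Vorbis.Spec.compute_twiddle_factors.sar32_toNat _ 3 (by omega)]
      u_read
    · rw [w_flags]
      simp only [X86.User.df_setStatus]
      exact he_df
    · rw [w_mxcsr]
      exact he_mx
  exact Vorbis.Spec.compute_twiddle_factors.loop1_ok hLay hμ hcode hcos hstore4 hsin he0 hpre hN s_10bc7d 0 w_rip hb w_r13 w_r14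
    (Nat.zero_le _) (w_kept.mono_all (by rfl))
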